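-- pv_equiv track=rewrite | github.com/qazz625/Competitive-Programming-Codes | Codeforces/1560/1560d.py | check
-- ===== SOURCE A (Python) =====
-- def check(n, goal):
-- 	n = str(n)
-- 	goal = str(goal)
--
-- 	ans = 10**10
-- 	ind = 0
-- 	for i in range(len(n)):
-- 		if ind != len(goal) and goal[ind] == n[i]:
-- 			ind += 1
--
-- 	return len(n) - ind + len(goal) - ind
-- ===== SOURCE B (Python) =====
-- def check(n, goal):
--     s = str(n)
--     g = str(goal)
--     occ = {}
--     for i, ch in enumerate(s):
--         occ.setdefault(ch, []).append(i)
--     ind = 0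
--     pos = 0
--     for ch in g:
--         lst = occ.get(ch, [])
--         lo, hi = 0, len(lst)
--         while lo < hi:
--             mid = (lo + hi) // 2
--             if lst[mid] < pos:
--                 lo = mid + 1
--             else:
--                 hi = mid
--         if lo == len(lst):
--             break
--         pos = lst[lo] + 1
--         ind += 1
--     return len(s) - ind + len(g) - ind
-- ===== Notes on version B (the rewrite author's own statement) =====
-- stated objective: alternative
-- what changed: B precomputes a dict mapping each character of str(n) to its sorted list of positions, then walks goal, binary-searching each character's position list for the first position >= pos, instead of A's single left-to-right scan of str(n) with a goal pointer.
import Mathlib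
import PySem

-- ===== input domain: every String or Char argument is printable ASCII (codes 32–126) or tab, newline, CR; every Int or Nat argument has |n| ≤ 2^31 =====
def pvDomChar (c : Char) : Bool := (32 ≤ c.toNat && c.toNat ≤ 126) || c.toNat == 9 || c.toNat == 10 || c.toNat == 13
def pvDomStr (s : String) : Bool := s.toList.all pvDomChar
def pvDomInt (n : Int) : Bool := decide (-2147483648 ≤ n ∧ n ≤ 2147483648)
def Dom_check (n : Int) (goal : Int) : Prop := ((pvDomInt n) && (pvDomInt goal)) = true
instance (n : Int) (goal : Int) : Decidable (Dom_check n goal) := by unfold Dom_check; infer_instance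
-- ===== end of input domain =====

-- B change (objective 'alternative'): B first builds a per-character occurrence-index table
-- of str(n) and then walks goal, binary-searching each character's sorted position list for
-- the first position ≥ pos, instead of A's left-to-right scan of n with a goal pointer.

-- ===== PORT A =====
-- A: ind scans n left to right, advancing a pointer into goal on each match.
def check (n : Int) (goal : Int) : Int :=
  let s := PySem.Int.toChars n
  let g := PySem.Int.toChars goal
  let ind := s.foldl (fun ind c =>
    if ind ≠ g.length ∧ PySem.List.pyGet? g (ind : Int) = some c then ind + 1 else ind) 0
  (s.length : Int) - ind + g.length - ind

-- ===== PORT B =====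
-- B's while loop: hand-written binary search for the first list position in [lo, hi)
-- whose element is ≥ pos (as in Source B; the list holds Python ints, i.e. Int).
def bsearch (lst : List Int) (pos : Int) (lo hi : Nat) : Nat :=
  if _h : lo < hi then
    let mid := (lo + hi) / 2
    if lst.getD mid 0 < pos then bsearch lst pos (mid + 1) hi else bsearch lst pos lo mid
  else lo
termination_by hi - lo
decreasing_by all_goals omega

-- B's for loop over goal (break → stop the recursion).
def bLoop (occ : PySem.Dict Char (List Int)) (g : List Char) (pos : Int) (ind : Nat) : Nat :=
  match g with
  | [] => ind
  | c :: rest =>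
    let lst := occ.getD c []
    let lo := bsearch lst pos 0 lst.length
    if lo = lst.length then ind
    else bLoop occ rest (lst.getD lo 0 + 1) (ind + 1)

def check_alt (n : Int) (goal : Int) : Int :=
  let s := PySem.Int.toChars n
  let g := PySem.Int.toChars goal
  -- occ.setdefault(ch, []).append(i)  ≡  occ[ch] = occ.get(ch, []) + [i]  = Dict.modify
  let occ := (PySem.List.enumerate s 0).foldl
    (fun d p => d.modify p.2 [] (· ++ [p.1])) PySem.Dict.empty
  let ind := bLoop occ g 0 0
  (s.length : Int) - ind + g.length - ind

-- ===== PRECONDITION & SPEC =====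
def Spec_check (n : Int) (goal : Int) (out : Int) : Prop := out = check_alt n goal
instance (n : Int) (goal : Int) (out : Int) : Decidable (Spec_check n goal out) := by unfold Spec_check; infer_instance

-- ===== CLAIM (what is proved, stated in full; the proofs are below) =====
def Claim_equal_check : Prop := ∀ (n : Int) (goal : Int), Dom_check n goal → Spec_check n goal (check n goal)

-- ===== LEMMAS AND PROOFS =====

-- The common greedy leftmost subsequence match length.
def greedy (s g : List Char) : Nat :=
  match s, g with
  | _, [] => 0
  | [], _ => 0
  | a :: s', c :: g' => if a = c then 1 + greedy s' g' else greedy s' (c :: g')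

theorem greedy_nil_right (s : List Char) : greedy s [] = 0 := by
  cases s <;> simp [greedy]

theorem greedy_nil_left (g : List Char) : greedy [] g = 0 := by
  cases g <;> simp [greedy]

theorem greedy_cons (t : List Char) (c : Char) (g' : List Char) :
    greedy t (c :: g') =
      match t.findIdx? (· == c) with
      | none => 0
      | some k => 1 + greedy (t.drop (k + 1)) g' := by
  induction t with
  | nil => simp [greedy]
  | cons a t' ih =>
    by_cases h : a = c
    · simp [greedy, h, List.findIdx?_cons]
    · have hb : (a == c) = false := by simp [h]
      simp only [greedy, if_neg h, ih, List.findIdx?_cons, hb]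
      cases hf : t'.findIdx? (· == c) <;> simp

-- A's fold equals greedy.
theorem foldA_eq (s g : List Char) (ind : Nat) (h : ind ≤ g.length) :
    s.foldl (fun ind c =>
      if ind ≠ g.length ∧ PySem.List.pyGet? g (ind : Int) = some c then ind + 1 else ind) ind
    = ind + greedy s (g.drop ind) := by
  induction s generalizing ind with
  | nil => simp [greedy_nil_left]
  | cons a s' ih =>
    simp only [List.foldl_cons]
    by_cases he : ind = g.length
    · have hd : g.drop ind = [] := by simp [he]
      rw [if_neg (fun hx => hx.1 he), ih ind h, hd, greedy_nil_right, greedy_nil_right]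
    · have hlt : ind < g.length := lt_of_le_of_ne h he
      have hdrop : g.drop ind = g[ind] :: g.drop (ind + 1) :=
        List.drop_eq_getElem_cons hlt
      have hget : PySem.List.pyGet? g (ind : Int) = some g[ind] := by
        rw [PySem.List.pyGet?_natCast]
        exact List.getElem?_eq_getElem hlt
      by_cases hc : g[ind] = a
      · have : (if ind ≠ g.length ∧ PySem.List.pyGet? g (ind : Int) = some a then ind + 1 else ind) = ind + 1 := by
          rw [if_pos ⟨he, by rw [hget, hc]⟩]
        rw [this, ih (ind + 1) hlt, hdrop, greedy, if_pos hc.symm]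
        omega
      · have : (if ind ≠ g.length ∧ PySem.List.pyGet? g (ind : Int) = some a then ind + 1 else ind) = ind := by
          rw [if_neg]; rintro ⟨-, hx⟩
          rw [hget] at hx; exact hc (Option.some.inj hx)
        rw [this, ih ind h, hdrop, greedy, if_neg (fun hh => hc hh.symm), ← hdrop]

-- Specification of B's occurrence table: the positions of c in s, starting at offset i.
def occFrom (s : List Char) (c : Char) (i : Nat) : List Int :=
  match s with
  | [] => []
  | a :: t => if a = c then (i : Int) :: occFrom t c (i + 1) else occFrom t c (i + 1)

theorem enum_filter_eq_occFrom (s : List Char) (c : Char) (i : Nat) :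
    ((PySem.List.enumerate s (i : Int)).filter (fun p => p.2 == c)).map (·.1)
      = occFrom s c i := by
  induction s generalizing i with
  | nil => simp [PySem.List.enumerate_nil, occFrom]
  | cons a t ih =>
    have hcast : ((i : Int) + 1) = ((i + 1 : Nat) : Int) := by push_cast; ring
    rw [PySem.List.enumerate_cons, hcast]
    by_cases h : a = c <;> simp [occFrom, h] <;> exact_mod_cast ih (i + 1)

theorem occ_getD (s : List Char) (c : Char) :
    (((PySem.List.enumerate s 0).foldl
        (fun d p => d.modify p.2 [] (· ++ [p.1])) PySem.Dict.empty).getD c [])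
      = occFrom s c 0 := by
  have hswap : (PySem.List.enumerate s 0).foldl
      (fun d p => d.modify p.2 [] (· ++ [p.1])) PySem.Dict.empty
      = ((PySem.List.enumerate s 0).map (fun p => (p.2, p.1))).foldl
          (fun d p => d.modify p.1 [] (· ++ [p.2])) PySem.Dict.empty := by
    rw [List.foldl_map]
  rw [hswap, PySem.Dict.getD_foldl_modify_append, PySem.Dict.getD_empty]
  have : (((PySem.List.enumerate s 0).map (fun p => (p.2, p.1))).filter
      (fun p => p.1 == c)).map (·.2)
      = ((PySem.List.enumerate s 0).filter (fun p => p.2 == c)).map (·.1) := by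
    rw [List.filter_map, List.map_map]
    rfl
  rw [this]
  exact_mod_cast enum_filter_eq_occFrom s c 0

theorem occFrom_lb (s : List Char) (c : Char) (i : Nat) :
    ∀ x ∈ occFrom s c i, (i : Int) ≤ x := by
  induction s generalizing i with
  | nil => simp [occFrom]
  | cons a t ih =>
    intro x hx
    by_cases h : a = c
    · simp only [occFrom, if_pos h, List.mem_cons] at hx
      rcases hx with rfl | hx
      · exact le_refl _
      · have := ih (i + 1) x hx; push_cast at this ⊢; omega
    · simp only [occFrom, if_neg h] at hx
      have := ih (i + 1) x hx; push_cast at this ⊢; omega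

theorem occFrom_pairwise (s : List Char) (c : Char) (i : Nat) :
    (occFrom s c i).Pairwise (· < ·) := by
  induction s generalizing i with
  | nil => simp [occFrom]
  | cons a t ih =>
    by_cases h : a = c
    · simp only [occFrom, if_pos h]
      refine List.pairwise_cons.2 ⟨?_, ih (i + 1)⟩
      intro x hx
      have := occFrom_lb t c (i + 1) x hx
      push_cast at this ⊢; omega
    · simp only [occFrom, if_neg h]; exact ih (i + 1)

-- A strictly sorted list is monotone under getD.
theorem sorted_getD_mono (l : List Int) (hl : l.Pairwise (· < ·))
    (k m : Nat) (hkm : k ≤ m) (hm : m < l.length) :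
    l.getD k 0 ≤ l.getD m 0 := by
  rcases eq_or_lt_of_le hkm with rfl | hlt
  · exact le_refl _
  · have hk : k < l.length := lt_trans hlt hm
    have := (List.pairwise_iff_getElem.1 hl) k m hk hm hlt
    rw [List.getD_eq_getElem l 0 hk, List.getD_eq_getElem l 0 hm]
    exact le_of_lt this

-- dropWhile equals drop n when the first n elements satisfy p and the rest do not.
theorem dropWhile_eq_drop (p : Int → Bool) (l : List Int) (n : Nat)
    (hn : n ≤ l.length)
    (h1 : ∀ k, k < n → p (l.getD k 0) = true)
    (h2 : ∀ k, n ≤ k → k < l.length → p (l.getD k 0) = false) :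
    l.dropWhile p = l.drop n := by
  induction l generalizing n with
  | nil => simp
  | cons a t ih =>
    cases n with
    | zero =>
      have ha : p a = false := h2 0 (Nat.le_refl 0) (by simp)
      simp [ha]
    | succ m =>
      have ha : p a = true := h1 0 (Nat.succ_pos m)
      simp only [List.dropWhile_cons, ha, if_pos, List.drop_succ_cons]
      exact ih m (by simpa using hn) (fun k hk => h1 (k + 1) (by omega))
        (fun k hk hk' => h2 (k + 1) (by omega) (by simpa using Nat.succ_lt_succ hk'))

-- The binary search lands exactly where dropWhile (· < pos) stops.
theorem bsearch_le (lst : List Int) (pos : Int) (lo hi : Nat) (h : lo ≤ hi) :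
    lo ≤ bsearch lst pos lo hi ∧ bsearch lst pos lo hi ≤ hi := by
  induction lo, hi using bsearch.induct lst pos with
  | case1 lo hi hlt mid htrue ih =>
    rw [bsearch, dif_pos hlt, if_pos htrue]
    have := ih (by omega)
    simp only [mid] at this ⊢
    omega
  | case2 lo hi hlt mid hfalse ih =>
    rw [bsearch, dif_pos hlt, if_neg hfalse]
    have := ih (by omega)
    simp only [mid] at this ⊢
    omega
  | case3 lo hi hge =>
    rw [bsearch, dif_neg hge]
    omega

theorem bsearch_drop (lst : List Int) (pos : Int) (hl : lst.Pairwise (· < ·))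
    (lo hi : Nat) (hhi : hi ≤ lst.length) (hlohi : lo ≤ hi)
    (h1 : ∀ k, k < lo → lst.getD k 0 < pos)
    (h2 : ∀ k, hi ≤ k → k < lst.length → ¬ lst.getD k 0 < pos) :
    lst.drop (bsearch lst pos lo hi) = lst.dropWhile (fun x => decide (x < pos)) := by
  induction lo, hi using bsearch.induct lst pos with
  | case1 lo hi hlt mid htrue ih =>
    rw [bsearch, dif_pos hlt, if_pos htrue]
    refine ih hhi (by omega) ?_ h2
    intro k hk
    have hmid : mid < lst.length := by omega
    calc lst.getD k 0 ≤ lst.getD mid 0 := sorted_getD_mono lst hl k mid (by omega) hmid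
      _ < pos := htrue
  | case2 lo hi hlt mid hfalse ih =>
    rw [bsearch, dif_pos hlt, if_neg hfalse]
    refine ih (by omega) (by omega) h1 ?_
    intro k hk hk' hcon
    rcases Nat.lt_or_ge k hi with hk2 | hk2
    · have : lst.getD mid 0 ≤ lst.getD k 0 := sorted_getD_mono lst hl mid k hk hk'
      omega
    · exact h2 k hk2 hk' hcon
  | case3 lo hi hge =>
    rw [bsearch, dif_neg hge]
    have hn : lo ≤ lst.length := by omega
    exact (dropWhile_eq_drop _ lst lo hn
      (fun k hk => by simpa using h1 k hk)
      (fun k hk hk' => by simpa using h2 k (by omega) hk')).symm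

-- dropWhile (· < bound) is the identity on a list whose elements are all ≥ bound.
theorem dropWhile_of_lb (l : List Int) (b : Int) (h : ∀ x ∈ l, b ≤ x) :
    l.dropWhile (fun x => decide (x < b)) = l := by
  cases l with
  | nil => rfl
  | cons a t =>
    have := h a (by simp)
    simp [not_lt.2 this]

-- Master bridge: the first position ≥ i + p in occFrom s c i is the leftmost
-- occurrence of c in s.drop p (shifted by i + p).
theorem head_dropWhile_occFrom (s : List Char) (c : Char) (i p : Nat) :
    ((occFrom s c i).dropWhile (fun x => decide (x < ((i + p : Nat) : Int)))).head?
      = ((s.drop p).findIdx? (· == c)).map (fun k => ((i + p + k : Nat) : Int)) := by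
  induction s generalizing i p with
  | nil => simp [occFrom]
  | cons a t ih =>
    cases p with
    | zero =>
      by_cases h : a = c
      · have : ¬ ((i : Int) < ((i + 0 : Nat) : Int)) := by push_cast; omega
        simp [occFrom, h, List.findIdx?_cons]
      · have hb : (a == c) = false := by simp [h]
        have hdw : (occFrom t c (i + 1)).dropWhile
            (fun x => decide (x < ((i + 0 : Nat) : Int))) = occFrom t c (i + 1) := by
          refine dropWhile_of_lb _ _ ?_
          intro x hx
          have := occFrom_lb t c (i + 1) x hx; push_cast at this ⊢; omega
        have hdw' : (occFrom t c (i + 1)).dropWhile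
            (fun x => decide (x < ((i + 1 + 0 : Nat) : Int))) = occFrom t c (i + 1) := by
          refine dropWhile_of_lb _ _ ?_
          intro x hx
          have := occFrom_lb t c (i + 1) x hx; push_cast at this ⊢; omega
        have ihx := ih (i + 1) 0
        rw [hdw'] at ihx
        simp only [occFrom, if_neg h, hdw, List.drop_zero] at ihx ⊢
        rw [ihx, List.findIdx?_cons, hb]
        cases t.findIdx? (· == c) <;> simp <;> ring_nf
    | succ q =>
      have hc : ((i + (q + 1) : Nat) : Int) = (((i + 1) + q : Nat) : Int) := by push_cast; ring
      by_cases h : a = c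
      · have hlt : ((i : Int) < ((i + 1 + q : Nat) : Int)) := by push_cast; omega
        have ihx := ih (i + 1) q
        simp only [occFrom, if_pos h, List.drop_succ_cons, hc, List.dropWhile_cons]
        rw [if_pos (decide_eq_true hlt), ihx]
        cases (t.drop q).findIdx? (· == c) <;> simp <;> ring_nf
      · have ihx := ih (i + 1) q
        simp only [occFrom, if_neg h, List.drop_succ_cons, hc]
        rw [ihx]
        cases (t.drop q).findIdx? (· == c) <;> simp <;> ring_nf

-- B's goal loop equals greedy on s.drop p.
theorem bLoop_eq (s : List Char) (g : List Char) (p : Nat) (ind : Nat) :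
    bLoop ((PySem.List.enumerate s 0).foldl
        (fun d q => d.modify q.2 [] (· ++ [q.1])) PySem.Dict.empty) g ((p : Nat) : Int) ind
      = ind + greedy (s.drop p) g := by
  induction g generalizing p ind with
  | nil => simp [bLoop, greedy_nil_right]
  | cons c rest ih =>
    rw [bLoop]
    simp only [occ_getD]
    set lst := occFrom s c 0 with hlst
    have hpair : lst.Pairwise (· < ·) := occFrom_pairwise s c 0
    have hdrop : lst.drop (bsearch lst (p : Int) 0 lst.length)
        = lst.dropWhile (fun x => decide (x < ((p : Nat) : Int))) :=
      bsearch_drop lst (p : Int) hpair 0 lst.length (le_refl _) (Nat.zero_le _)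
        (fun k hk => absurd hk (Nat.not_lt_zero k)) (fun k hk hk' => absurd hk' (by omega))
    have hmaster := head_dropWhile_occFrom s c 0 p
    simp only [Nat.zero_add] at hmaster
    rw [greedy_cons, ← hlst] at *
    by_cases hend : bsearch lst (p : Int) 0 lst.length = lst.length
    · rw [if_pos hend]
      have : lst.dropWhile (fun x => decide (x < ((p : Nat) : Int))) = [] := by
        rw [← hdrop, hend, List.drop_length]
      rw [this] at hmaster
      cases hf : (s.drop p).findIdx? (· == c) with
      | none => simp
      | some k => rw [hf] at hmaster; simp at hmaster
    · rw [if_neg hend]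
      have hle := bsearch_le lst (p : Int) 0 lst.length (Nat.zero_le _)
      have hlt : bsearch lst (p : Int) 0 lst.length < lst.length := by omega
      have hhead : (lst.drop (bsearch lst (p : Int) 0 lst.length)).head?
          = some (lst.getD (bsearch lst (p : Int) 0 lst.length) 0) := by
        rw [List.head?_drop, List.getD_eq_getElem lst 0 hlt]
        exact List.getElem?_eq_getElem hlt
      rw [hdrop] at hhead
      rw [hhead] at hmaster
      cases hf : (s.drop p).findIdx? (· == c) with
      | none => rw [hf] at hmaster; simp at hmaster
      | some k =>
        rw [hf] at hmaster
        simp only [Option.map_some] at hmaster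
        have hval : lst.getD (bsearch lst (p : Int) 0 lst.length) 0 = ((p + k : Nat) : Int) :=
          Option.some.inj hmaster
        rw [hval]
        have : ((p + k : Nat) : Int) + 1 = (((p + k + 1 : Nat) : Nat) : Int) := by
          push_cast; ring
        rw [this, ih (p + k + 1) (ind + 1)]
        have hdd : s.drop (p + k + 1) = (s.drop p).drop (k + 1) := by
          rw [List.drop_drop]; ring_nf
        rw [hdd]; ring

-- ===== VERDICT (by name: the statement is the Claim_ definition above) =====
theorem check_spec : Claim_equal_check := by
  intro n goal _
  unfold Spec_check
  simp only [check, check_alt]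
  have hB := bLoop_eq (PySem.Int.toChars n) (PySem.Int.toChars goal) 0 0
  simp only [Nat.cast_zero, List.drop_zero, Nat.zero_add] at hB
  rw [hB, foldA_eq _ _ 0 (Nat.zero_le _)]
  simp
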